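-- pv_equiv track=rewrite | github.com/BardOfCodes/pack_poly | generator/poly_gen.py | get_free_edges
-- ===== SOURCE A (Python) =====
-- def get_free_edges(tile):
--     free_edges = []
--     for x,y in tile:
--         if (x - 1, y) not in tile: free_edges.append((x - 1, y))
--         if (x + 1, y) not in tile: free_edges.append((x + 1, y))
--         if (x, y - 1) not in tile: free_edges.append((x, y - 1))
--         if (x, y + 1) not in tile: free_edges.append((x, y + 1))
--     return sorted(set(free_edges))
-- ===== SOURCE B (Python) =====
-- def get_free_edges(tile):
--     # Sort-and-merge: no hashing, no membership scans. Sort all 4-neighbors and the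
--     # tile once, then a single two-pointer sweep dedupes adjacent equal neighbors and
--     # subtracts the sorted tile, emitting the result already in sorted order.
--     nbrs = sorted(n for x, y in tile for n in ((x - 1, y), (x + 1, y), (x, y - 1), (x, y + 1)))
--     rest = sorted(tile)
--     out = []
--     prev = None
--     for n in nbrs:
--         if n == prev:
--             continue
--         prev = n
--         while rest and rest[0] < n:
--             rest = rest[1:]
--         if not (rest and rest[0] == n):
--             out.append(n)
--     return out
-- ===== Notes on version B (the rewrite author's own statement) =====
-- stated objective: faster
-- what changed: Replaces A's per-cell linear 'not in tile' membership tests plus final set()+sorted() with a sort-and-merge algorithm: sort all generated neighbors and the tile once, then a single two-pointer sweep dedupes adjacent equal neighbors and subtracts the sorted tile, emitting the answer already in order.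
import Mathlib
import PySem

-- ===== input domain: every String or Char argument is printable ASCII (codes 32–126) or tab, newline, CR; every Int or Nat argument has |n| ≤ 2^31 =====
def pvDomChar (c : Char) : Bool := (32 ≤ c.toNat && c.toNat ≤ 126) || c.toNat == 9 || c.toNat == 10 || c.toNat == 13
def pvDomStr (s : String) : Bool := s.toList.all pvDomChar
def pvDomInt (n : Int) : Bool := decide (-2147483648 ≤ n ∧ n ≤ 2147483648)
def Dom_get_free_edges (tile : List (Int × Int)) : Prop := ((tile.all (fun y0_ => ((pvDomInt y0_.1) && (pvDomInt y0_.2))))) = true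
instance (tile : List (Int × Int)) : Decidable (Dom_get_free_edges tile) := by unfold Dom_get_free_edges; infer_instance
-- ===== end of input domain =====

-- B replaces A's per-cell 'not in tile' membership branches with a sort-and-merge:
-- sort the generated neighbors and the tile, then one two-pointer sweep dedupes and subtracts.

-- ===== PORT A =====
def get_free_edges (tile : List (Int × Int)) : List (Int × Int) :=
  let free_edges := tile.foldl (fun fe p =>
    let fe := if (p.1 - 1, p.2) ∉ tile then fe ++ [(p.1 - 1, p.2)] else fe
    let fe := if (p.1 + 1, p.2) ∉ tile then fe ++ [(p.1 + 1, p.2)] else fe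
    let fe := if (p.1, p.2 - 1) ∉ tile then fe ++ [(p.1, p.2 - 1)] else fe
    let fe := if (p.1, p.2 + 1) ∉ tile then fe ++ [(p.1, p.2 + 1)] else fe
    fe) []
  PySem.List.sorted2 (PySem.Set.ofList free_edges) (fun p => p.1) (fun p => p.2)

-- ===== PORT B =====
-- the four neighbors of a cell, in the order B's comprehension lists them
def pvNbrs (p : Int × Int) : List (Int × Int) :=
  [(p.1 - 1, p.2), (p.1 + 1, p.2), (p.1, p.2 - 1), (p.1, p.2 + 1)]

-- Python tuple '<' on pairs of ints (lexicographic)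
def pvLt (a b : Int × Int) : Bool :=
  decide (a.1 < b.1) || (decide (a.1 = b.1) && decide (a.2 < b.2))

-- B's 'while rest and rest[0] < n: rest = rest[1:]'
def pvSkip (n : Int × Int) : List (Int × Int) → List (Int × Int)
  | [] => []
  | r :: rs => if pvLt r n then pvSkip n rs else r :: rs

-- B's 'rest and rest[0] == n'
def pvHeadEq : List (Int × Int) → (Int × Int) → Bool
  | [], _ => false
  | r :: _, n => decide (r = n)

-- B's 'for n in nbrs' loop, state = (rest, prev, out)
def pvMergeLoop : List (Int × Int) → List (Int × Int) → Option (Int × Int) → List (Int × Int) → List (Int × Int)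
  | [], _, _, out => out
  | n :: ns, rest, prev, out =>
    if prev = some n then pvMergeLoop ns rest prev out
    else
      pvMergeLoop ns (pvSkip n rest) (some n)
        (if pvHeadEq (pvSkip n rest) n then out else out ++ [n])

def get_free_edges_alt (tile : List (Int × Int)) : List (Int × Int) :=
  let nbrs := PySem.List.sorted2 (tile.flatMap pvNbrs) (fun p => p.1) (fun p => p.2)
  let rest := PySem.List.sorted2 tile (fun p => p.1) (fun p => p.2)
  pvMergeLoop nbrs rest none []

-- ===== PRECONDITION & SPEC =====
def Spec_get_free_edges (tile : List (Int × Int)) (out : List (Int × Int)) : Prop := out = get_free_edges_alt tile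
instance (tile : List (Int × Int)) (out : List (Int × Int)) : Decidable (Spec_get_free_edges tile out) := by unfold Spec_get_free_edges; infer_instance

-- ===== CLAIM (what is proved, stated in full; the proofs are below) =====
def Claim_equal_get_free_edges : Prop := ∀ (tile : List (Int × Int)), Dom_get_free_edges tile → Spec_get_free_edges tile (get_free_edges tile)

-- ===== LEMMAS AND PROOFS =====

-- Python's tuple '<' is the Lex order on Int × Int
theorem pvLt_iff (a b : Int × Int) : pvLt a b = true ↔ toLex a < toLex b := by
  rw [Prod.Lex.lt_iff']
  unfold pvLt
  by_cases h1 : a.1 < b.1 <;> by_cases h2 : a.1 = b.1 <;> by_cases h3 : a.2 < b.2 <;>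
    simp [h1, h2, h3] <;> omega

theorem pvLt_false_iff (a b : Int × Int) : pvLt a b = false ↔ toLex b ≤ toLex a := by
  rw [← not_lt, ← pvLt_iff]
  simp

-- A's sorted(set(...)) key and B's sorted(...) are the same Lex sort
theorem pv_sorted2_eq_sorted_toLex (xs : List (Int × Int)) :
    PySem.List.sorted2 xs (fun p => p.1) (fun p => p.2) false
      = PySem.List.sorted xs (fun p => toLex p) false := by
  unfold PySem.List.sorted2 PySem.List.sorted
  simp only [if_neg (by decide : ¬ (false = true))]
  congr 1
  funext acc x
  congr 1
  funext a b
  have h : (decide (toLex a < toLex b))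
      = (decide (a.1 < b.1) || !decide (b.1 < a.1) && decide (a.2 < b.2)) := by
    by_cases h1 : a.1 < b.1 <;> by_cases h2 : b.1 < a.1 <;> by_cases h3 : a.2 < b.2 <;>
      simp [Prod.Lex.lt_iff', h1, h2, h3] <;> omega
  exact h.symm

-- A's loop body appends exactly the neighbors not in tile
theorem pv_body_eq (tile : List (Int × Int)) (fe : List (Int × Int)) (p : Int × Int) :
    (let fe := if (p.1 - 1, p.2) ∉ tile then fe ++ [(p.1 - 1, p.2)] else fe
     let fe := if (p.1 + 1, p.2) ∉ tile then fe ++ [(p.1 + 1, p.2)] else fe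
     let fe := if (p.1, p.2 - 1) ∉ tile then fe ++ [(p.1, p.2 - 1)] else fe
     let fe := if (p.1, p.2 + 1) ∉ tile then fe ++ [(p.1, p.2 + 1)] else fe
     fe) = fe ++ (pvNbrs p).filter (fun n => !tile.contains n) := by
  simp only [pvNbrs, List.filter, List.contains_eq_mem]
  by_cases h1 : (p.1 - 1, p.2) ∈ tile <;> by_cases h2 : (p.1 + 1, p.2) ∈ tile <;>
    by_cases h3 : (p.1, p.2 - 1) ∈ tile <;> by_cases h4 : (p.1, p.2 + 1) ∈ tile <;>
    simp [h1, h2, h3, h4, List.append_assoc]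

-- the merge loop only appends to out
theorem pvMergeLoop_out (ns : List (Int × Int)) :
    ∀ rest prev out, pvMergeLoop ns rest prev out = out ++ pvMergeLoop ns rest prev [] := by
  induction ns with
  | nil => intro rest prev out; simp [pvMergeLoop]
  | cons n ns ih =>
    intro rest prev out
    by_cases h : prev = some n
    · simp only [pvMergeLoop, if_pos h]
      exact ih rest prev out
    · simp only [pvMergeLoop, if_neg h]
      by_cases hc : pvHeadEq (pvSkip n rest) n = true
      · simp only [if_pos hc]
        exact ih _ _ _
      · simp only [if_neg hc]
        rw [ih _ _ (out ++ [n]), ih _ _ ([] ++ [n])]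
        simp

-- pvSkip preserves membership of elements ≥ n
theorem mem_pvSkip (n x : Int × Int) (rest : List (Int × Int)) (hx : toLex n ≤ toLex x) :
    x ∈ pvSkip n rest ↔ x ∈ rest := by
  induction rest with
  | nil => simp [pvSkip]
  | cons r rs ih =>
    by_cases h : pvLt r n = true
    · have hlt : toLex r < toLex n := (pvLt_iff r n).mp h
      have hne : x ≠ r := by
        intro he; subst he
        exact absurd (lt_of_lt_of_le hlt hx) (lt_irrefl _)
      simp [pvSkip, h, ih, hne]
    · simp [pvSkip, h]

-- pvSkip returns a sublist (hence sortedness is preserved)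
theorem pvSkip_sublist (n : Int × Int) (rest : List (Int × Int)) :
    (pvSkip n rest).Sublist rest := by
  induction rest with
  | nil => simp [pvSkip]
  | cons r rs ih =>
    by_cases h : pvLt r n = true
    · simpa [pvSkip, h] using ih.cons r
    · simp [pvSkip, h]

-- the head surviving pvSkip is not < n
theorem pvSkip_head_not_lt (n r : Int × Int) (rest rs' : List (Int × Int))
    (h : pvSkip n rest = r :: rs') : pvLt r n = false := by
  induction rest with
  | nil => simp [pvSkip] at h
  | cons a as ih =>
    by_cases ha : pvLt a n = true
    · exact ih (by simpa [pvSkip, ha] using h)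
    · rw [pvSkip, if_neg ha] at h
      cases h
      simpa using ha

-- on a sorted rest, head-equality after pvSkip IS the membership test
theorem pvHeadEq_iff_mem (n : Int × Int) (rest : List (Int × Int))
    (hs : rest.Pairwise (fun a b => toLex a ≤ toLex b)) :
    pvHeadEq (pvSkip n rest) n = true ↔ n ∈ pvSkip n rest := by
  have hsub := pvSkip_sublist n rest
  have hps : (pvSkip n rest).Pairwise (fun a b => toLex a ≤ toLex b) := hs.sublist hsub
  cases hsk : pvSkip n rest with
  | nil => simp [pvHeadEq]
  | cons r rs' =>
    have hhead : toLex n ≤ toLex r := (pvLt_false_iff r n).mp (pvSkip_head_not_lt n r rest rs' hsk)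
    constructor
    · intro h
      have : r = n := by simpa [pvHeadEq] using h
      simp [this]
    · intro h
      rcases List.mem_cons.mp h with h | h
      · simp [pvHeadEq, h.symm]
      · have hle : toLex r ≤ toLex n := by
          rw [hsk] at hps
          exact (List.pairwise_cons.mp hps).1 n h
        have : r = n := toLex.injective (le_antisymm hle hhead)
        simp [pvHeadEq, this]

-- MAIN INVARIANT of B's sweep: on sorted inputs it produces a strictly increasing list
-- whose members are exactly the neighbors outside tile (and distinct from prev)
theorem pv_merge_spec (tile : List (Int × Int)) :
    ∀ (ns rest : List (Int × Int)) (prev : Option (Int × Int)),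
    ns.Pairwise (fun a b => toLex a ≤ toLex b) →
    rest.Pairwise (fun a b => toLex a ≤ toLex b) →
    (∀ p, prev = some p → ∀ n ∈ ns, toLex p ≤ toLex n) →
    (∀ n ∈ ns, (n ∈ tile ↔ n ∈ rest)) →
    (pvMergeLoop ns rest prev []).Pairwise (fun a b => toLex a < toLex b) ∧
    (∀ x, x ∈ pvMergeLoop ns rest prev [] ↔ (x ∈ ns ∧ x ∉ tile ∧ prev ≠ some x)) := by
  intro ns
  induction ns with
  | nil => intro rest prev _ _ _ _; simp [pvMergeLoop]
  | cons n ns ih =>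
    intro rest prev hns hrest hprev htile
    have hns' := (List.pairwise_cons.mp hns).2
    have hn_le : ∀ x ∈ ns, toLex n ≤ toLex x := (List.pairwise_cons.mp hns).1
    by_cases hp : prev = some n
    · -- skip a duplicate of prev
      rw [pvMergeLoop, if_pos hp]
      obtain ⟨hpw, hmem⟩ := ih rest prev hns' hrest
        (fun p hpp x hx => by cases hp ▸ hpp; exact hn_le x hx)
        (fun x hx => htile x (List.mem_cons_of_mem n hx))
      refine ⟨hpw, fun x => (hmem x).trans ?_⟩
      constructor
      · rintro ⟨h1, h2, h3⟩
        exact ⟨List.mem_cons_of_mem n h1, h2, h3⟩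
      · rintro ⟨h1, h2, h3⟩
        rcases List.mem_cons.mp h1 with h | h
        · exact absurd (h ▸ hp) h3
        · exact ⟨h, h2, h3⟩
    · -- a new candidate n
      rw [pvMergeLoop, if_neg hp]
      have hrest' : (pvSkip n rest).Pairwise (fun a b => toLex a ≤ toLex b) :=
        hrest.sublist (pvSkip_sublist n rest)
      have htest : (pvHeadEq (pvSkip n rest) n = true) ↔ (n ∈ tile) := by
        rw [pvHeadEq_iff_mem n rest hrest, mem_pvSkip n n rest le_rfl]
        exact (htile n List.mem_cons_self).symm
      obtain ⟨hpw, hmem⟩ := ih (pvSkip n rest) (some n) hns' hrest'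
        (fun p hpp x hx => by cases hpp; exact hn_le x hx)
        (fun x hx => (htile x (List.mem_cons_of_mem n hx)).trans
          (mem_pvSkip n x rest (hn_le x hx)).symm)
      have hgt : ∀ x ∈ pvMergeLoop ns (pvSkip n rest) (some n) [], toLex n < toLex x := by
        intro x hx
        obtain ⟨h1, _, h3⟩ := (hmem x).mp hx
        exact lt_of_le_of_ne (hn_le x h1) (fun he => h3 (by rw [toLex.injective he]))
      by_cases hc : pvHeadEq (pvSkip n rest) n = true
      · -- n is in tile: not emitted
        rw [if_pos hc]
        have hnin : n ∈ tile := htest.mp hc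
        refine ⟨hpw, fun x => (hmem x).trans ?_⟩
        constructor
        · rintro ⟨h1, h2, h3⟩
          refine ⟨List.mem_cons_of_mem n h1, h2, ?_⟩
          intro he
          have hxle : toLex x ≤ toLex n := hprev x he n List.mem_cons_self
          exact hp ((toLex.injective (le_antisymm hxle (hn_le x h1))) ▸ he)
        · rintro ⟨h1, h2, h3⟩
          rcases List.mem_cons.mp h1 with h | h
          · subst h; exact absurd hnin h2
          · refine ⟨h, h2, ?_⟩
            intro he; cases he
            exact absurd hnin h2
      · -- n is free: emitted
        rw [if_neg hc]
        have hnin : n ∉ tile := fun h => hc (htest.mpr h)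
        rw [pvMergeLoop_out ns (pvSkip n rest) (some n) ([] ++ [n])]
        simp only [List.nil_append, List.singleton_append]
        constructor
        · exact List.pairwise_cons.mpr ⟨hgt, hpw⟩
        · intro x
          rw [List.mem_cons, hmem x]
          constructor
          · rintro (h | ⟨h1, h2, h3⟩)
            · subst h
              exact ⟨List.mem_cons_self, hnin, hp⟩
            · refine ⟨List.mem_cons_of_mem n h1, h2, ?_⟩
              intro he
              have hxle : toLex x ≤ toLex n := hprev x he n List.mem_cons_self
              exact hp ((toLex.injective (le_antisymm hxle (hn_le x h1))) ▸ he)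
          · rintro ⟨h1, h2, h3⟩
            rcases List.mem_cons.mp h1 with h | h
            · exact Or.inl h
            · by_cases hxn : x = n
              · exact Or.inl hxn
              · exact Or.inr ⟨h, h2, fun he => hxn (by cases he; rfl)⟩

-- ===== VERDICT (by name: the statement is the Claim_ definition above) =====
theorem get_free_edges_spec : Claim_equal_get_free_edges := by
  intro tile _
  unfold Spec_get_free_edges get_free_edges get_free_edges_alt
  simp only []
  -- A's accumulated list is the filtered flatMap
  have hA : tile.foldl (fun fe p =>
      let fe := if (p.1 - 1, p.2) ∉ tile then fe ++ [(p.1 - 1, p.2)] else fe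
      let fe := if (p.1 + 1, p.2) ∉ tile then fe ++ [(p.1 + 1, p.2)] else fe
      let fe := if (p.1, p.2 - 1) ∉ tile then fe ++ [(p.1, p.2 - 1)] else fe
      let fe := if (p.1, p.2 + 1) ∉ tile then fe ++ [(p.1, p.2 + 1)] else fe
      fe) []
      = (tile.flatMap pvNbrs).filter (fun n => !tile.contains n) := by
    have := PySem.List.foldl_append_eq_flatMap
      (fun p => (pvNbrs p).filter (fun n => !tile.contains n)) tile ([] : List (Int × Int))
    rw [PySem.List.foldl_congr_mem (h := fun fe p _ => pv_body_eq tile fe p), this,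
      List.nil_append, ← List.filter_flatMap]
  rw [hA, pv_sorted2_eq_sorted_toLex, pv_sorted2_eq_sorted_toLex, pv_sorted2_eq_sorted_toLex]
  -- B's sweep
  obtain ⟨hpw, hmem⟩ := pv_merge_spec tile
    (PySem.List.sorted (tile.flatMap pvNbrs) (fun p => toLex p) false)
    (PySem.List.sorted tile (fun p => toLex p) false) none
    (PySem.List.sorted_pairwise _ _)
    (PySem.List.sorted_pairwise _ _)
    (fun p hp => by cases hp)
    (fun x _ => (PySem.List.mem_sorted _ _ _ x).symm)
  apply PySem.List.sorted_eq_of_perm_of_pairwise_lt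
  · -- the sweep's output is a permutation of set(free_edges)
    apply (List.perm_ext_iff_of_nodup ?_ ?_).mpr
    · intro x
      rw [hmem x, PySem.Set.mem_ofList, List.mem_filter, PySem.List.mem_sorted]
      simp [List.contains_eq_mem]
    · exact hpw.imp (fun h => ne_of_apply_ne toLex (ne_of_lt h))
    · exact PySem.Set.nodup_ofList _
  · exact hpw
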